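-- pv_equiv track=rewrite | github.com/pypi-data/pypi-mirror-126 | packages/zippyshare/zippyshare-0.0.7.tar.gz/zippyshare-0.0.7/zippyshare/utils.py | read_account_info
-- ===== SOURCE A (Python) =====
-- def read_account_info(s):
--     credentials = [[]]
--     for line in s.splitlines()[2:]:
--         if not line:
--             credentials.append([])
--             continue
--         credentials[-1].append(line)
--     return credentials
-- ===== SOURCE B (Python) =====
-- def read_account_info(s):
--     lines = s.splitlines()[2:]
--     seps = [-1] + [i for i, l in enumerate(lines) if not l] + [len(lines)]
--     return [lines[a + 1:b] for a, b in zip(seps, seps[1:])]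
-- ===== Notes on version B (the rewrite author's own statement) =====
-- stated objective: alternative
-- what changed: A builds the groups in one accumulating pass appending each line to the last group; B first collects the positions of the blank-line separators and then produces each group by slicing the line list between consecutive separator positions.
import Mathlib
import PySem

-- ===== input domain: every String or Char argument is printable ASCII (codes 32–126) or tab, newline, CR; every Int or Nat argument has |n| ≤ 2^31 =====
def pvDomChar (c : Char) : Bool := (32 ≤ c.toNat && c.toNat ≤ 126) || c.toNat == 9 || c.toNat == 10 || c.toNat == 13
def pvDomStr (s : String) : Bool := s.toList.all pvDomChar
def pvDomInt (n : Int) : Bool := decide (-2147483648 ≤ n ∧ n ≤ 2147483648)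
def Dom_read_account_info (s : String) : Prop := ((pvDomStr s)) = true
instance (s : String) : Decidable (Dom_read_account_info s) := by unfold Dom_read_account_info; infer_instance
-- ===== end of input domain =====

-- B replaces A's single accumulating pass by computing the blank-line separator
-- positions first and slicing the line list between consecutive separators (alternative decomposition).

-- ===== PORT A =====
-- loop body of A: blank line opens a new group, otherwise append to the last group
def pvStepA (credentials : List (List String)) (line : String) : List (List String) :=
  if line = "" then credentials ++ [[]]
  else credentials.dropLast ++ [credentials.getLastD [] ++ [line]]

def read_account_info (s : String) : List (List String) :=
  (PySem.List.slice (PySem.Str.splitlines s) (some 2) none).foldl pvStepA [[]]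

-- ===== PORT B =====
def read_account_info_alt (s : String) : List (List String) :=
  let lines := PySem.List.slice (PySem.Str.splitlines s) (some 2) none
  let seps : List Int :=
    [-1] ++ ((PySem.List.enumerate lines 0).filter (fun p => p.2 = "")).map Prod.fst
         ++ [(lines.length : Int)]
  (seps.zip (PySem.List.slice seps (some 1) none)).map
    (fun p => PySem.List.slice lines (some (p.1 + 1)) (some p.2))

-- ===== PRECONDITION & SPEC =====
def Spec_read_account_info (s : String) (out : List (List String)) : Prop := out = read_account_info_alt s
instance (s : String) (out : List (List String)) : Decidable (Spec_read_account_info s out) := by unfold Spec_read_account_info; infer_instance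

-- ===== CLAIM (what is proved, stated in full; the proofs are below) =====
def Claim_equal_read_account_info : Prop := ∀ (s : String), Dom_read_account_info s → Spec_read_account_info s (read_account_info s)

-- ===== LEMMAS AND PROOFS =====

-- common reference: grouping of a line list by blank lines
def pvG : List String → List (List String)
  | [] => [[]]
  | l :: t => if l = "" then [] :: pvG t
              else match pvG t with
                   | [] => [[l]]
                   | g :: gs => (l :: g) :: gs

lemma pvG_ne (ls : List String) : pvG ls ≠ [] := by
  cases ls with
  | nil => simp [pvG]
  | cons l t =>
    by_cases h : l = "" <;> simp [pvG, h]
    cases hg : pvG t <;> simp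

lemma pvG_headD_tail (ls : List String) : (pvG ls).head?.getD [] :: (pvG ls).tail = pvG ls := by
  cases hg : pvG ls with
  | nil => exact absurd hg (pvG_ne ls)
  | cons g gs => rfl

lemma pv_mem_zip {l l' : List Int} {p : Int × Int} (h : p ∈ l.zip l') : p.1 ∈ l ∧ p.2 ∈ l' := by
  induction l generalizing l' with
  | nil => simp at h
  | cons a t ih =>
    cases l' with
    | nil => simp at h
    | cons b t' =>
      rcases List.mem_cons.mp h with h | h
      · subst h; simp
      · obtain ⟨h1, h2⟩ := ih h
        exact ⟨List.mem_cons_of_mem _ h1, List.mem_cons_of_mem _ h2⟩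

-- A side: the accumulating fold in terms of pvG
lemma pv_foldA (ls : List String) (pre : List (List String)) (lastg : List String) :
    List.foldl pvStepA (pre ++ [lastg]) ls
      = pre ++ ((lastg ++ (pvG ls).headD []) :: (pvG ls).tail) := by
  induction ls generalizing pre lastg with
  | nil => simp [pvG]
  | cons l t ih =>
    by_cases h : l = ""
    · subst h
      have : pvStepA (pre ++ [lastg]) "" = (pre ++ [lastg]) ++ [[]] := by simp [pvStepA]
      rw [List.foldl_cons, this, ih]
      simp only [pvG]
      rw [List.append_assoc]
      simp [pvG_headD_tail]
    · have hstep : pvStepA (pre ++ [lastg]) l = pre ++ [lastg ++ [l]] := by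
        simp [pvStepA, h]
      rw [List.foldl_cons, hstep, ih]
      cases hg : pvG t with
      | nil => exact absurd hg (pvG_ne t)
      | cons g gs => simp [pvG, h, hg]

-- B side
def pvIdx (ls : List String) : List Int :=
  ((PySem.List.enumerate ls 0).filter (fun p => p.2 = "")).map Prod.fst

def pvSeps (ls : List String) : List Int := -1 :: (pvIdx ls ++ [(ls.length : Int)])

def pvB (ls : List String) : List (List String) :=
  ((pvSeps ls).zip (pvSeps ls).tail).map
    (fun p => PySem.List.slice ls (some (p.1 + 1)) (some p.2))

lemma pv_enumerate_shift {α : Type} (xs : List α) (s : Int) :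
    PySem.List.enumerate xs (s + 1) = (PySem.List.enumerate xs s).map (fun p => (p.1 + 1, p.2)) := by
  induction xs generalizing s with
  | nil => simp [PySem.List.enumerate_nil]
  | cons x t ih => simp [PySem.List.enumerate_cons, ih]

lemma pvIdx_cons (l : String) (t : List String) :
    pvIdx (l :: t) = (if l = "" then [(0 : Int)] else []) ++ (pvIdx t).map (· + 1) := by
  unfold pvIdx
  rw [PySem.List.enumerate_cons]
  rw [show (0 : Int) + 1 = 0 + 1 from rfl, pv_enumerate_shift]
  by_cases h : l = "" <;>
    simp [h, List.filter_map, List.map_map, Function.comp_def]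

lemma pvIdx_nonneg (ls : List String) : ∀ a ∈ pvIdx ls, 0 ≤ a := by
  intro a ha
  unfold pvIdx at ha
  simp only [List.mem_map, List.mem_filter] at ha
  obtain ⟨p, ⟨hp, _⟩, rfl⟩ := ha
  rw [PySem.List.mem_enumerate_iff] at hp
  obtain ⟨k, hk, rfl⟩ := hp
  simp

lemma pvSeps_tail_nonneg (ls : List String) : ∀ b ∈ (pvSeps ls).tail, 0 ≤ b := by
  intro b hb
  simp only [pvSeps, List.tail_cons, List.mem_append, List.mem_singleton] at hb
  rcases hb with h | h
  · exact pvIdx_nonneg ls b h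
  · subst h; positivity

lemma pvSeps_mem_ge (ls : List String) : ∀ a ∈ pvSeps ls, -1 ≤ a := by
  intro a ha
  rcases List.mem_cons.mp ha with h | h
  · omega
  · have := pvSeps_tail_nonneg ls a (by simpa [pvSeps] using h); omega

lemma pv_slice_shift {α : Type} (x : α) (xs : List α) (a b : Int) (ha : 0 ≤ a) (hb : 0 ≤ b) :
    PySem.List.slice (x :: xs) (some (a + 1)) (some (b + 1)) = PySem.List.slice xs (some a) (some b) := by
  rw [PySem.List.slice_toNat _ (by omega) (by omega), PySem.List.slice_toNat _ ha hb]
  have h1 : (a + 1).toNat = a.toNat + 1 := by omega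
  have h2 : (b + 1).toNat = b.toNat + 1 := by omega
  simp [h1, h2]

lemma pv_slice_head (l : String) (t : List String) (b : Int) (hb : 0 ≤ b) :
    PySem.List.slice (l :: t) (some 0) (some (b + 1)) = l :: PySem.List.slice t (some 0) (some b) := by
  rw [PySem.List.slice_toNat _ (by omega) (by omega), PySem.List.slice_toNat _ le_rfl hb]
  have h2 : (b + 1).toNat = b.toNat + 1 := by omega
  simp [h2]

lemma pv_zip_map_tail (f : Int → Int) (S : List Int) :
    ((S.map f).zip (S.map f).tail) = (S.zip S.tail).map (fun p => (f p.1, f p.2)) := by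
  rw [← List.map_tail, List.zip_map]
  rfl

lemma pv_zip_map_tail_cons {R : List Int} {r0 : Int} {R' : List Int} (hR : R = r0 :: R') :
    ((-1 : Int) :: R.map (· + 1)).zip (R.map (· + 1))
      = (-1, r0 + 1) :: (R.zip R').map (fun p => (p.1 + 1, p.2 + 1)) := by
  subst hR
  have h := pv_zip_map_tail (· + 1) (r0 :: R')
  simp only [List.map_cons, List.tail_cons] at h
  rw [List.map_cons, List.zip_cons_cons, h]

lemma pvB_eq_pvG (ls : List String) : pvB ls = pvG ls := by
  induction ls with
  | nil => simp [pvB, pvSeps, pvIdx, pvG, PySem.List.enumerate_nil, PySem.List.slice]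
  | cons l t ih =>
    by_cases h : l = ""
    · subst h
      have hseps : pvSeps ("" :: t) = -1 :: (pvSeps t).map (· + 1) := by
        simp [pvSeps, pvIdx_cons]
      unfold pvB
      rw [hseps, List.tail_cons,
        pv_zip_map_tail_cons (rfl : pvSeps t = -1 :: (pvIdx t ++ [(t.length : Int)]))]
      rw [List.map_cons, List.map_map]
      rw [show pvG ("" :: t) = [] :: pvG t from by simp [pvG]]
      congr 1
      have hrest : ((pvSeps t).zip (pvIdx t ++ [(t.length : Int)])).map
            ((fun p => PySem.List.slice ("" :: t) (some (p.1 + 1)) (some p.2)) ∘ (fun p => (p.1 + 1, p.2 + 1)))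
            = pvB t := by
          unfold pvB
          rw [show (pvSeps t).tail = pvIdx t ++ [(t.length : Int)] from rfl]
          apply List.map_congr_left
          intro p hp
          obtain ⟨h1, h2⟩ := pv_mem_zip hp
          have ha := pvSeps_mem_ge t p.1 h1
          have hb := pvSeps_tail_nonneg t p.2
            (by rw [show (pvSeps t).tail = pvIdx t ++ [(t.length : Int)] from rfl]; exact h2)
          simp only [Function.comp_apply]
          rw [show p.1 + 1 + 1 = (p.1 + 1) + 1 from by ring, pv_slice_shift _ _ _ _ (by omega) hb]
      rw [hrest, ih]
    · have hseps : pvSeps (l :: t) = -1 :: (pvIdx t ++ [(t.length : Int)]).map (· + 1) := by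
        simp [pvSeps, pvIdx_cons, h]
      set R : List Int := pvIdx t ++ [(t.length : Int)] with hRdef
      have hRne : R ≠ [] := by simp [hRdef]
      obtain ⟨r0, R', hR⟩ := List.exists_cons_of_ne_nil hRne
      have hr0 : 0 ≤ r0 := by
        have : r0 ∈ (pvSeps t).tail := by simp [pvSeps, ← hRdef, hR]
        exact pvSeps_tail_nonneg t r0 this
      have hR'sub : ∀ p ∈ R.zip R', 0 ≤ p.1 ∧ 0 ≤ p.2 := by
        intro p hp
        obtain ⟨h1, h2⟩ := pv_mem_zip hp
        constructor
        · exact pvSeps_tail_nonneg t p.1 (by simp [pvSeps, ← hRdef, h1])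
        · have : p.2 ∈ R := by rw [hR]; exact List.mem_cons_of_mem _ h2
          exact pvSeps_tail_nonneg t p.2 (by simp [pvSeps, ← hRdef, this])
      -- pvB t in split form
      have hBt : pvB t = PySem.List.slice t (some 0) (some r0)
          :: (R.zip R').map (fun p => PySem.List.slice t (some (p.1 + 1)) (some p.2)) := by
        unfold pvB
        rw [show pvSeps t = -1 :: R from rfl, List.tail_cons, hR, List.zip_cons_cons, List.map_cons]
        rw [show (-1 : Int) + 1 = 0 from rfl, ← hR]
      have hBlt : pvB (l :: t) = (l :: PySem.List.slice t (some 0) (some r0))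
          :: (R.zip R').map (fun p => PySem.List.slice t (some (p.1 + 1)) (some p.2)) := by
        unfold pvB
        rw [hseps, List.tail_cons]
        rw [pv_zip_map_tail_cons hR]
        rw [List.map_cons, List.map_map]
        congr 1
        · rw [show (-1 : Int) + 1 = 0 from rfl, pv_slice_head _ _ _ hr0]
        · apply List.map_congr_left
          intro p hp
          obtain ⟨hp1, hp2⟩ := hR'sub p hp
          simp only [Function.comp_apply]
          rw [show p.1 + 1 + 1 = (p.1 + 1) + 1 from by ring, pv_slice_shift _ _ _ _ (by omega) hp2]
      rw [hBlt]
      have : pvG (l :: t) = match pvG t with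
        | [] => [[l]]
        | g :: gs => (l :: g) :: gs := by simp [pvG, h]
      rw [this, ← ih, hBt]

lemma pv_alt_eq (s : String) :
    read_account_info_alt s = pvB (PySem.List.slice (PySem.Str.splitlines s) (some 2) none) := by
  rw [read_account_info_alt, pvB, pvSeps, pvIdx, PySem.List.slice_from_one]
  rfl

-- ===== VERDICT (by name: the statement is the Claim_ definition above) =====
theorem read_account_info_spec : Claim_equal_read_account_info := by
  intro s _
  show read_account_info s = read_account_info_alt s
  rw [read_account_info, pv_alt_eq, pvB_eq_pvG]
  have := pv_foldA (PySem.List.slice (PySem.Str.splitlines s) (some 2) none) [] []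
  simpa [pvG_headD_tail] using this
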